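-- pv_equiv track=rewrite | github.com/Misael-art/WinDeckHelper_RetroSDK | core/diagnostic_manager.py | _detect_dependency_cycles
-- ===== SOURCE A (Python) =====
-- from typing import Dict, List, Optional, Any, Tuple
--
-- def _detect_dependency_cycles(component: str, dependencies_map: Dict[str, List[str]]) -> Tuple[bool, List[str]]:
--     """
--     Detecta ciclos nas dependências
--
--     Args:
--         component: Componente inicial
--         dependencies_map: Mapa de dependências
--
--     Returns:
--         Tuple[bool, List[str]]: (tem_ciclo, caminho_do_ciclo)
--     """
--     visited = set()
--     rec_stack = set()
--     path = []
--
--     def has_cycle(comp):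
--         if comp in rec_stack:
--             # Encontrou ciclo, retorna o caminho
--             cycle_start = path.index(comp)
--             return True, path[cycle_start:] + [comp]
--
--         if comp in visited:
--             return False, []
--
--         visited.add(comp)
--         rec_stack.add(comp)
--         path.append(comp)
--
--         for dep in dependencies_map.get(comp, []):
--             has_cycle_result, cycle_path = has_cycle(dep)
--             if has_cycle_result:
--                 return True, cycle_path
--
--         rec_stack.remove(comp)
--         path.pop()
--         return False, []
--
--     return has_cycle(component)
-- ===== SOURCE B (Python) =====
-- def _detect_dependency_cycles(component, dependencies_map):
--     """Iterative DFS with an explicit work stack of visit/exit frames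
--     (same visit order and cycle-path reconstruction as the recursive version)."""
--     visited = set()
--     rec_stack = set()
--     path = []
--     stack = [("visit", component)]
--     while stack:
--         kind, comp = stack.pop()
--         if kind == "exit":
--             rec_stack.remove(comp)
--             path.pop()
--             continue
--         if comp in rec_stack:
--             i = path.index(comp)
--             return True, path[i:] + [comp]
--         if comp in visited:
--             continue
--         visited.add(comp)
--         rec_stack.add(comp)
--         path.append(comp)
--         stack.append(("exit", comp))
--         for dep in reversed(dependencies_map.get(comp, [])):
--             stack.append(("visit", dep))
--     return False, []
-- ===== Notes on version B (the rewrite author's own statement) =====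
-- stated objective: alternative
-- what changed: The nested recursive has_cycle closure mutating enclosing state is replaced by an iterative DFS driven by an explicit work stack of visit/exit frames (deps pushed in reverse so they pop in order; exit frames undo rec_stack/path), keeping the same visit order and cycle-path reconstruction.
import Mathlib
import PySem

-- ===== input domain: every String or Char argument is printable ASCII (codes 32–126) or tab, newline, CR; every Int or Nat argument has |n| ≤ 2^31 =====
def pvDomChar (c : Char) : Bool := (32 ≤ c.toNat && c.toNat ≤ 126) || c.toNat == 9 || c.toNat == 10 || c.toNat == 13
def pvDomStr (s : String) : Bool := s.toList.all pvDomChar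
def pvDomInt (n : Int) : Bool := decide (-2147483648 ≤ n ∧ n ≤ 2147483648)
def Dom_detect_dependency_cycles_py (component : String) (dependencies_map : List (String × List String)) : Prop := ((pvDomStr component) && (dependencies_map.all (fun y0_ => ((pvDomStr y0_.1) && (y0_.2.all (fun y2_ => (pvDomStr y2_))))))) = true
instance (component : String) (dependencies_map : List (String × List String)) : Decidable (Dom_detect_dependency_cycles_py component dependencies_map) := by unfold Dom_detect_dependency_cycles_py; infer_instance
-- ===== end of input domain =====

-- B replaces A's recursive nested has_cycle by an iterative DFS over an explicit stack of
-- visit/exit frames (same visit order, same cycle path); objective: alternative decomposition.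

-- ===== PORT A =====
-- Literal port of A's recursive has_cycle plus its `for dep in …` loop, with a standard fuel
-- guard for totality (fuel = 1 + total number of listed dependencies always suffices: each
-- has_cycle call consumes one unit and a node's dependency list is iterated at most once).
-- Each function threads the leftover fuel through (the bound `f ≤ fuel` is only for termination).
-- `rec_stack.remove(comp)` / `path.pop()` are ported as Set.discard / dropLast: at that point
-- comp is in rec_stack and is the last path element, so these are exact.
mutual
def pvGoA (dm : PySem.Dict String (List String)) (fuel : Nat) (comp : String)
    (vis rstk path : List String) :
    ((Bool × List String) × (List String × List String × List String)) × {f : Nat // f ≤ fuel} :=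
  match fuel with
  | 0 => (((false, []), (vis, rstk, path)), ⟨0, Nat.le_refl 0⟩)
  | Nat.succ fuel' =>
    if PySem.Set.contains rstk comp then
      (((true, path.drop ((PySem.List.index? path comp).getD 0) ++ [comp]), (vis, rstk, path)),
        ⟨fuel', Nat.le_succ fuel'⟩)
    else if PySem.Set.contains vis comp then
      (((false, []), (vis, rstk, path)), ⟨fuel', Nat.le_succ fuel'⟩)
    else
      match pvLoopA dm fuel' (dm.getD comp []) (PySem.Set.add vis comp)
          (PySem.Set.add rstk comp) (path ++ [comp]) with
      | (((b, p), (vis2, rstk2, path2)), ⟨f2, hf2⟩) =>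
        if b then (((true, p), (vis2, rstk2, path2)), ⟨f2, Nat.le_succ_of_le hf2⟩)
        else (((false, []), (vis2, PySem.Set.discard rstk2 comp, path2.dropLast)),
          ⟨f2, Nat.le_succ_of_le hf2⟩)
termination_by (fuel, 0)
decreasing_by
  apply Prod.Lex.left; omega

def pvLoopA (dm : PySem.Dict String (List String)) (fuel : Nat) (deps : List String)
    (vis rstk path : List String) :
    ((Bool × List String) × (List String × List String × List String)) × {f : Nat // f ≤ fuel} :=
  match deps with
  | [] => (((false, []), (vis, rstk, path)), ⟨fuel, Nat.le_refl fuel⟩)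
  | d :: ds =>
    match pvGoA dm fuel d vis rstk path with
    | (((b, p), (vis1, rstk1, path1)), ⟨f1, h1⟩) =>
      if b then (((true, p), (vis1, rstk1, path1)), ⟨f1, h1⟩)
      else
        match pvLoopA dm f1 ds vis1 rstk1 path1 with
        | (((b2, p2), st2), ⟨f2, h2⟩) => (((b2, p2), st2), ⟨f2, Nat.le_trans h2 h1⟩)
termination_by (fuel, deps.length + 1)
decreasing_by
  · apply Prod.Lex.right; simp [List.length_cons]
  · rcases Nat.lt_or_ge f1 fuel with h | h
    · apply Prod.Lex.left; omega
    · have : f1 = fuel := Nat.le_antisymm h1 h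
      subst this; apply Prod.Lex.right; simp [List.length_cons]
end

def detect_dependency_cycles_py (component : String) (dependencies_map : List (String × List String)) : Bool × List String :=
  let fuel := 1 + dependencies_map.foldl (fun a p => a + p.2.length) 0
  ((pvGoA (PySem.Dict.mk dependencies_map) fuel component [] [] []).1).1

-- ===== PORT B =====
-- Port of Source B: the work stack (head = top) holds visit/exit frames; pushing the deps of a
-- fresh node in reverse onto the list-end stack of Python corresponds to prepending them in
-- order here. The same fuel guard (one unit per processed visit frame) makes it total.
inductive PvFrame : Type
  | visit : String → PvFrame
  | exit : String → PvFrame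
deriving DecidableEq, Repr

def pvRunB (dm : PySem.Dict String (List String)) (fuel : Nat) (stack : List PvFrame)
    (vis rstk path : List String) : Bool × List String :=
  match fuel, stack with
  | _, [] => (false, [])
  | f, PvFrame.exit c :: rest =>
    pvRunB dm f rest vis (PySem.Set.discard rstk c) path.dropLast
  | 0, PvFrame.visit _ :: _ => (false, [])
  | Nat.succ f, PvFrame.visit c :: rest =>
    if PySem.Set.contains rstk c then
      (true, path.drop ((PySem.List.index? path c).getD 0) ++ [c])
    else if PySem.Set.contains vis c then
      pvRunB dm f rest vis rstk path
    else
      pvRunB dm f ((dm.getD c []).map PvFrame.visit ++ PvFrame.exit c :: rest)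
        (PySem.Set.add vis c) (PySem.Set.add rstk c) (path ++ [c])
termination_by (fuel, stack.length)
decreasing_by
  · apply Prod.Lex.right; simp [List.length_cons]
  · apply Prod.Lex.left; omega
  · apply Prod.Lex.left; omega

def detect_dependency_cycles_py_alt (component : String) (dependencies_map : List (String × List String)) : Bool × List String :=
  let fuel := 1 + dependencies_map.foldl (fun a p => a + p.2.length) 0
  pvRunB (PySem.Dict.mk dependencies_map) fuel [PvFrame.visit component] [] [] []

-- ===== PRECONDITION & SPEC =====
def Spec_detect_dependency_cycles_py (component : String) (dependencies_map : List (String × List String)) (out : Bool × List String) : Prop := out = detect_dependency_cycles_py_alt component dependencies_map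
instance (component : String) (dependencies_map : List (String × List String)) (out : Bool × List String) : Decidable (Spec_detect_dependency_cycles_py component dependencies_map out) := by unfold Spec_detect_dependency_cycles_py; infer_instance

-- ===== CLAIM (what is proved, stated in full; the proofs are below) =====
def Claim_equal_detect_dependency_cycles_py : Prop := ∀ (component : String) (dependencies_map : List (String × List String)), Dom_detect_dependency_cycles_py component dependencies_map → Spec_detect_dependency_cycles_py component dependencies_map (detect_dependency_cycles_py component dependencies_map)

-- ===== LEMMAS AND PROOFS =====

-- With no fuel left, the stack machine returns (false, []) whatever the stack holds.
theorem pvRunB_zero (dm : PySem.Dict String (List String)) (stack : List PvFrame)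
    (vis rstk path : List String) : pvRunB dm 0 stack vis rstk path = (false, []) := by
  induction stack generalizing rstk path with
  | nil => simp [pvRunB]
  | cons fr rest ih =>
    cases fr with
    | visit c => simp [pvRunB]
    | exit c => simp [pvRunB, ih]

-- A's has_cycle either reports a cycle or returns the literal pair (false, []).
theorem pvGoA_shape (dm : PySem.Dict String (List String)) (fuel : Nat) (comp : String)
    (vis rstk path : List String) :
    ((pvGoA dm fuel comp vis rstk path).1).1.1 = true ∨
      ((pvGoA dm fuel comp vis rstk path).1).1 = (false, []) := by
  match fuel with
  | 0 => right; simp [pvGoA]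
  | Nat.succ fuel' =>
    rw [pvGoA]
    split_ifs with h1 h2
    · left; rfl
    · right; rfl
    · rcases hl : pvLoopA dm fuel' (dm.getD comp []) (PySem.Set.add vis comp)
          (PySem.Set.add rstk comp) (path ++ [comp]) with ⟨⟨⟨b, p⟩, vis2, rstk2, path2⟩, ⟨f2, hf2⟩⟩
      cases b
      · right; simp
      · left; simp

-- On an empty stack the machine returns (false, []) for any fuel.
theorem pvRunB_nil (dm : PySem.Dict String (List String)) (fuel : Nat)
    (vis rstk path : List String) : pvRunB dm fuel [] vis rstk path = (false, []) := by
  cases fuel <;> simp [pvRunB]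

-- The simulation: one visit frame on the stack behaves like one has_cycle call, and a block of
-- visit frames followed by the matching exit frame behaves like A's dependency loop.
mutual
theorem pvSim_go (dm : PySem.Dict String (List String)) (fuel : Nat) (c : String)
    (vis rstk path : List String) (rest : List PvFrame) :
    pvRunB dm fuel (PvFrame.visit c :: rest) vis rstk path =
      (match pvGoA dm fuel c vis rstk path with
       | (((b, p), (vis', rstk', path')), ⟨f', _⟩) =>
         if b then (b, p) else pvRunB dm f' rest vis' rstk' path') := by
  match fuel with
  | 0 => simp [pvRunB_zero, pvGoA]
  | Nat.succ fuel' =>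
    rw [pvRunB, pvGoA]
    split_ifs with h1 h2
    · rfl
    · rfl
    · rw [pvSim_loop dm fuel' c (dm.getD c []) (PySem.Set.add vis c) (PySem.Set.add rstk c)
        (path ++ [c]) rest]
      rcases hl : pvLoopA dm fuel' (dm.getD c []) (PySem.Set.add vis c)
          (PySem.Set.add rstk c) (path ++ [c]) with ⟨⟨⟨b, p⟩, vis2, rstk2, path2⟩, ⟨f2, hf2⟩⟩
      cases b <;> simp
termination_by (fuel, 0)
decreasing_by
  apply Prod.Lex.left; omega

theorem pvSim_loop (dm : PySem.Dict String (List String)) (fuel : Nat) (c : String)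
    (deps : List String) (vis rstk path : List String) (rest : List PvFrame) :
    pvRunB dm fuel (deps.map PvFrame.visit ++ PvFrame.exit c :: rest) vis rstk path =
      (match pvLoopA dm fuel deps vis rstk path with
       | (((b, p), (vis', rstk', path')), ⟨f', _⟩) =>
         if b then (b, p)
         else pvRunB dm f' rest vis' (PySem.Set.discard rstk' c) path'.dropLast) := by
  match deps with
  | [] =>
    rw [List.map_nil, List.nil_append, pvRunB, pvLoopA]
    rfl
  | d :: ds =>
    rw [List.map_cons, List.cons_append,
      pvSim_go dm fuel d vis rstk path (ds.map PvFrame.visit ++ PvFrame.exit c :: rest),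
      pvLoopA]
    rcases hg : pvGoA dm fuel d vis rstk path with ⟨⟨⟨b, p⟩, vis1, rstk1, path1⟩, ⟨f1, h1⟩⟩
    cases b
    · simp only [Bool.false_eq_true, if_false]
      rw [pvSim_loop dm f1 c ds vis1 rstk1 path1 rest]
    · simp
termination_by (fuel, deps.length + 1)
decreasing_by
  all_goals simp only [List.length_cons]
  all_goals first
    | (apply Prod.Lex.right; omega)
    | (rcases Nat.lt_or_ge f1 fuel with h | h
       · apply Prod.Lex.left; omega
       · have hq : f1 = fuel := Nat.le_antisymm h1 h
         subst hq; apply Prod.Lex.right; omega)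
end

-- ===== VERDICT (by name: the statement is the Claim_ definition above) =====
theorem detect_dependency_cycles_py_spec : Claim_equal_detect_dependency_cycles_py := by
  unfold Claim_equal_detect_dependency_cycles_py
  intro component dependencies_map _
  unfold Spec_detect_dependency_cycles_py detect_dependency_cycles_py detect_dependency_cycles_py_alt
  dsimp only
  rw [pvSim_go]
  rcases hg : pvGoA (PySem.Dict.mk dependencies_map)
      (1 + dependencies_map.foldl (fun a p => a + p.2.length) 0) component [] [] [] with
    ⟨⟨⟨b, p⟩, vis', rstk', path'⟩, ⟨f', hf⟩⟩
  have hsh := pvGoA_shape (PySem.Dict.mk dependencies_map)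
    (1 + dependencies_map.foldl (fun a p => a + p.2.length) 0) component [] [] []
  rw [hg] at hsh
  cases b
  · simp only [Bool.false_eq_true, if_false, pvRunB_nil]
    simp at hsh
    simp [hsh]
  · simp
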